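-- pv_equiv track=rewrite | github.com/eddythesixthofsevens/kavin-and-eyad-cpt | proj.py | traitValueFinder
-- ===== SOURCE A (Python) =====
-- SuperGoodTraits = ["Speed II","Strength II", "Skill II", "Power II", "Sneak II", "Intelligence II"]
--
-- goodTraits = ["Speed I","Strength I", "Skill I", "Power I", "Sneak I", "Intelligence I", "Sharp sight"]
--
-- badTraits = ["Blindness I", "Slowness I", "Cursed I", "Brittle I", "Dullness I", "Deafness I", "Heavy Bleeding"]
--
-- SuperBadTraits = ["Blindness II", "Slowness II", "Cursed II", "Dullness II", "Deafness II", "Hemorrhage"]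
--
-- def traitValueFinder(TraitList):
--     charTotalValue = 0
--     for trait in TraitList:
--         if trait in SuperGoodTraits:
--             charTotalValue += 2
--         elif trait in goodTraits:
--             charTotalValue += 1
--         elif trait in badTraits:
--             charTotalValue -= 1
--         elif trait in SuperBadTraits:
--             charTotalValue -= 2
--     return charTotalValue
-- ===== SOURCE B (Python) =====
-- SuperGoodTraits = ["Speed II","Strength II", "Skill II", "Power II", "Sneak II", "Intelligence II"]
--
-- goodTraits = ["Speed I","Strength I", "Skill I", "Power I", "Sneak I", "Intelligence I", "Sharp sight"]
--
-- badTraits = ["Blindness I", "Slowness I", "Cursed I", "Brittle I", "Dullness I", "Deafness I", "Heavy Bleeding"]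
--
-- SuperBadTraits = ["Blindness II", "Slowness II", "Cursed II", "Dullness II", "Deafness II", "Hemorrhage"]
--
-- def traitValueFinder(TraitList):
--     # Stage 1: histogram of the input traits.
--     counts = {}
--     for trait in TraitList:
--         counts[trait] = counts.get(trait, 0) + 1
--     # Stage 2: iterate over the four weight tables (not over TraitList),
--     # adding weight * multiplicity for each known trait.  Correct because
--     # the four tables are pairwise disjoint and each is duplicate-free.
--     total = 0
--     for weight, table in ((2, SuperGoodTraits), (1, goodTraits), (-1, badTraits), (-2, SuperBadTraits)):
--         for t in table:
--             total += weight * counts.get(t, 0)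
--     return total
-- ===== Notes on version B (the rewrite author's own statement) =====
-- stated objective: faster
-- what changed: Inverts the traversal: instead of scanning TraitList and classifying each trait with a four-way if/elif membership chain, B builds a histogram of TraitList once and then iterates over the four fixed trait tables, summing weight times multiplicity per table key.
import Mathlib
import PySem

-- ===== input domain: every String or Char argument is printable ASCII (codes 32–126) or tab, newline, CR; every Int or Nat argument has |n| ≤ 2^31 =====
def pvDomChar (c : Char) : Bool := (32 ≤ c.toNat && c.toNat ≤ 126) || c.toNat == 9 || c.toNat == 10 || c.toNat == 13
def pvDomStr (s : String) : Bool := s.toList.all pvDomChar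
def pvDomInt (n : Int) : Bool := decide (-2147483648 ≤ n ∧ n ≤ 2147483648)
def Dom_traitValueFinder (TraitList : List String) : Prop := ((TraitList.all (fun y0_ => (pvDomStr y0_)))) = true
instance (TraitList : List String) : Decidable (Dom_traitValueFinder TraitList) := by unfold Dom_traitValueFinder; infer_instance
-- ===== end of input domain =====

-- B inverts the traversal: it builds a histogram of TraitList once, then iterates over the
-- four fixed trait tables summing weight * multiplicity (objective: alternative).


-- ===== PORT A =====
def SuperGoodTraits : List String := ["Speed II","Strength II", "Skill II", "Power II", "Sneak II", "Intelligence II"]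
def goodTraits : List String := ["Speed I","Strength I", "Skill I", "Power I", "Sneak I", "Intelligence I", "Sharp sight"]
def badTraits : List String := ["Blindness I", "Slowness I", "Cursed I", "Brittle I", "Dullness I", "Deafness I", "Heavy Bleeding"]
def SuperBadTraits : List String := ["Blindness II", "Slowness II", "Cursed II", "Dullness II", "Deafness II", "Hemorrhage"]

def traitValueFinder (TraitList : List String) : Int :=
  TraitList.foldl
    (fun charTotalValue trait =>
      if trait ∈ SuperGoodTraits then charTotalValue + 2
      else if trait ∈ goodTraits then charTotalValue + 1
      else if trait ∈ badTraits then charTotalValue - 1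
      else if trait ∈ SuperBadTraits then charTotalValue - 2
      else charTotalValue)
    0

-- ===== PORT B =====
def traitValueFinder_alt (TraitList : List String) : Int :=
  -- Stage 1: histogram of the input traits ('counts[trait] = counts.get(trait, 0) + 1')
  let counts : PySem.Dict String Int :=
    TraitList.foldl (fun d trait => d.insert trait (d.getD trait 0 + 1)) PySem.Dict.empty
  -- Stage 2: iterate over the four weight tables, not over TraitList
  ([((2 : Int), SuperGoodTraits), (1, goodTraits), (-1, badTraits), (-2, SuperBadTraits)]).foldl
    (fun total wt =>
      wt.2.foldl (fun total t => total + wt.1 * counts.getD t 0) total)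
    0

-- ===== PRECONDITION & SPEC =====
def Spec_traitValueFinder (TraitList : List String) (out : Int) : Prop := out = traitValueFinder_alt TraitList
instance (TraitList : List String) (out : Int) : Decidable (Spec_traitValueFinder TraitList out) := by unfold Spec_traitValueFinder; infer_instance

-- ===== CLAIM =====
def Claim_equal_traitValueFinder : Prop := ∀ (TraitList : List String), Dom_traitValueFinder TraitList → Spec_traitValueFinder TraitList (traitValueFinder TraitList)

-- ===== LEMMAS AND PROOFS =====

-- weighted count sum of one table over an input list
def csum (L l : List String) : Int := (L.map (fun k => (l.count k : Int))).sum

-- total that B computes, expressed with List.count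
def wtotal (l : List String) : Int :=
  2 * csum SuperGoodTraits l + csum goodTraits l - csum badTraits l - 2 * csum SuperBadTraits l

def allTraitKeys : List String := SuperGoodTraits ++ goodTraits ++ badTraits ++ SuperBadTraits

lemma csum_nil (L : List String) : csum L [] = 0 := by
  simp [csum]

lemma csum_cons (L : List String) (t : String) (rest : List String) :
    csum L (t :: rest) = csum L rest + L.count t := by
  induction L with
  | nil => simp [csum]
  | cons a L ih =>
    simp only [csum, List.map_cons, List.sum_cons, List.count_cons] at *
    rw [ih]
    by_cases h : a = t
    · simp [h]
      ring
    · have h' : ¬ (t = a) := fun he => h he.symm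
      simp [h, h']
      ring

-- A's per-element if/elif chain value equals the weighted multiplicity in the four tables
lemma step_score (t : String) :
    (if t ∈ SuperGoodTraits then (2 : Int)
     else if t ∈ goodTraits then 1
     else if t ∈ badTraits then -1
     else if t ∈ SuperBadTraits then -2
     else 0)
    = 2 * SuperGoodTraits.count t + goodTraits.count t
      - badTraits.count t - 2 * SuperBadTraits.count t := by
  by_cases h : t ∈ allTraitKeys
  · simp only [allTraitKeys, SuperGoodTraits, goodTraits, badTraits, SuperBadTraits,
      List.cons_append, List.nil_append,
      List.mem_cons, List.not_mem_nil, or_false] at h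
    rcases h with rfl|rfl|rfl|rfl|rfl|rfl|rfl|rfl|rfl|rfl|rfl|rfl|rfl|rfl|rfl|rfl|rfl|rfl|rfl|rfl|rfl|rfl|rfl|rfl|rfl|rfl <;> decide
  · have h1 : t ∉ SuperGoodTraits := fun hm => h (by simp [allTraitKeys, hm])
    have h2 : t ∉ goodTraits := fun hm => h (by simp [allTraitKeys, hm])
    have h3 : t ∉ badTraits := fun hm => h (by simp [allTraitKeys, hm])
    have h4 : t ∉ SuperBadTraits := fun hm => h (by simp [allTraitKeys, hm])
    simp [h1, h2, h3, h4, List.count_eq_zero_of_not_mem]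

-- A's fold from any accumulator is that accumulator plus the weighted count total
lemma fold_eq (l : List String) (acc : Int) :
    l.foldl
      (fun charTotalValue trait =>
        if trait ∈ SuperGoodTraits then charTotalValue + 2
        else if trait ∈ goodTraits then charTotalValue + 1
        else if trait ∈ badTraits then charTotalValue - 1
        else if trait ∈ SuperBadTraits then charTotalValue - 2
        else charTotalValue)
      acc = acc + wtotal l := by
  induction l generalizing acc with
  | nil => simp [wtotal, csum_nil]
  | cons t rest ih =>
    simp only [List.foldl_cons, ih]
    have hs := step_score t
    have hw : wtotal (t :: rest)
        = wtotal rest + (2 * SuperGoodTraits.count t + goodTraits.count t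
          - badTraits.count t - 2 * SuperBadTraits.count t) := by
      simp only [wtotal, csum_cons]; ring
    rw [hw, ← hs]
    split_ifs <;> ring

-- B's nested table folds compute the same weighted count total
lemma alt_eq (l : List String) : traitValueFinder_alt l = wtotal l := by
  unfold traitValueFinder_alt
  simp only [List.foldl_cons, List.foldl_nil]
  simp only [PySem.List.foldl_add, PySem.Dict.getD_foldl_insert_add_one, PySem.Dict.getD_empty]
  simp only [wtotal, csum, List.sum_map_mul_left, zero_add]
  ring_nf

-- ===== VERDICT =====
theorem traitValueFinder_spec : Claim_equal_traitValueFinder := by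
  intro TraitList _
  unfold Spec_traitValueFinder traitValueFinder
  rw [alt_eq, fold_eq]
  ring
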